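-- pv_equiv track=rewrite | github.com/phutharesuanwachirapisut/Ph_Python | dev_lab/repeat_pyramid.py | repeat_pyramid
-- ===== SOURCE A (Python) =====
-- import math
--
-- def repeat_pyramid(word):
--     result = [word[0]]
--     teter = word[0]
--     limit_len = (2 * len(word) - 1)
--
--     for i in range(1,len(word)):
--         teter = word[i] + " " + teter + " " + word[i]
--         result.append(teter)
--     dedarer = ""
--     for j in range(len(result)):
--         dedarer = " " * (limit_len - math.ceil(len(result[j])/2)) + result[j]
--         result[j] = dedarer
--     last_re = ""
--     for z in result:
--         last_re = last_re + z + "\n"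
--     return last_re
-- ===== SOURCE B (Python) =====
-- def repeat_pyramid(word):
--     n = len(word)
--     lines = []
--     for j in range(n):
--         line = " ".join(word[:j+1][::-1] + word[1:j+1])
--         lines.append(" " * (2 * (n - 1 - j)) + line)
--     return "".join(line + "\n" for line in lines)
-- ===== Notes on version B (the rewrite author's own statement) =====
-- stated objective: simpler
-- what changed: B drops A's incremental teter accumulation, ceil-based re-padding pass and repeated string concatenation of the output: each line j is built directly as the space-join of the reversed prefix slice plus the tail slice, padded by the closed form 2*(n-1-j), and the lines are joined once.
import Mathlib
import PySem

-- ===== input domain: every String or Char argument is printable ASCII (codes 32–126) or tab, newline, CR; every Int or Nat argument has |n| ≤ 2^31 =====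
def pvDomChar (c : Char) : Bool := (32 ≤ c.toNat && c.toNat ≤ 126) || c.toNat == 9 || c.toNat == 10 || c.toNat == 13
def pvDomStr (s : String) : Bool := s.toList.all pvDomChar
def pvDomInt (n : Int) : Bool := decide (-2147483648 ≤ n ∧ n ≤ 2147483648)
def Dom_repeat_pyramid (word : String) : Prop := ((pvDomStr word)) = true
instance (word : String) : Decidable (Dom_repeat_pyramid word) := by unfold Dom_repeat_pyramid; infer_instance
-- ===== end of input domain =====

-- B replaces A's incremental line accumulation and per-line ceil-padding by a direct closed-form
-- construction of each line from slices of the word ('simpler'); return values agree on every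
-- non-empty word (A raises IndexError on "").

-- ===== PORT A =====
def repeat_pyramid (word : String) : String :=
  let w := word.toList
  -- word[0] raises IndexError on the empty string (excluded by Pre_); the guard value is never used inside Pre_
  match PySem.List.pyGet? w 0 with
  | none => ""
  | some c0 =>
    let limit_len : Int := 2 * (w.length : Int) - 1
    -- for i in range(1, len(word)): teter = word[i] + " " + teter + " " + word[i]; result.append(teter)
    let st := (PySem.List.pyRange 1 (w.length : Int)).foldl
      (fun (st : List (List Char) × List Char) i =>
        let c := (PySem.List.pyGet? w i).getD ' '   -- i ∈ [1, len): always in range, default never used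
        let teter := [c] ++ [' '] ++ st.2 ++ [' '] ++ [c]
        (st.1 ++ [teter], teter)) ([[c0]], [c0])
    -- 'for j in range(len(result)): result[j] = " " * (limit_len - ceil(len(result[j])/2)) + result[j]'
    -- is an in-place elementwise update (each step reads only result[j]) = map;
    -- math.ceil(len/2) is exact here as (len+1)//2 (nonneg ints; floats exact far beyond these lengths)
    let result := st.1.map (fun r =>
      List.replicate ((limit_len - (((r.length : Int) + 1) / 2)).toNat) ' ' ++ r)
    String.ofList (result.foldl (fun acc z => acc ++ z ++ ['\n']) [])

-- ===== PORT B =====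
def repeat_pyramid_alt (word : String) : String :=
  let w := word.toList
  let n := w.length
  let lines := (List.range n).foldl (fun (acc : List (List Char)) (j : Nat) =>
    -- " ".join(word[:j+1][::-1] + word[1:j+1])
    let line := PySem.Chars.join [' ']
      ((((PySem.List.slice? (PySem.List.slice w none (some ((j : Int) + 1))) none none (-1)).getD [])
        ++ PySem.List.slice w (some 1) (some ((j : Int) + 1))).map (fun c => [c]))
    acc ++ [List.replicate ((2 * (n - 1 - j) : Nat)) ' ' ++ line]) []
  String.ofList (PySem.Chars.join [] (lines.map (fun l => l ++ ['\n'])))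

-- ===== PRECONDITION & SPEC =====
-- A raises IndexError (word[0]) on the empty string; Pre_ excludes exactly that input.
def Pre_repeat_pyramid (word : String) : Prop := word ≠ ""
instance (word : String) : Decidable (Pre_repeat_pyramid word) := by unfold Pre_repeat_pyramid; infer_instance
def pvWitness_repeat_pyramid : String := "ab"

def Spec_repeat_pyramid (word : String) (out : String) : Prop := out = repeat_pyramid_alt word
instance (word : String) (out : String) : Decidable (Spec_repeat_pyramid word out) := by unfold Spec_repeat_pyramid; infer_instance

-- ===== CLAIM (what is proved, stated in full; the proofs are below) =====
def Claim_equal_repeat_pyramid : Prop := ∀ (word : String), Dom_repeat_pyramid word → Pre_repeat_pyramid word → Spec_repeat_pyramid word (repeat_pyramid word)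
-- ===== LEMMAS AND PROOFS =====

-- the j-th pyramid line, before padding, as both programs build it
def pyr (w : List Char) : Nat → List Char
  | 0 => [w.headD ' ']
  | j+1 => [w.getD (j+1) ' ', ' '] ++ pyr w j ++ [' ', w.getD (j+1) ' ']

theorem pyr_length (w : List Char) (j : Nat) : (pyr w j).length = 4 * j + 1 := by
  induction j with
  | zero => simp [pyr]
  | succ j ih => simp [pyr, ih]; omega

-- A's first loop: state after processing range(1, k+1)
theorem A_loop (w : List Char) (k : Nat) (hk : k < w.length) :
    (PySem.List.pyRange 1 ((k : Int) + 1)).foldl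
      (fun (st : List (List Char) × List Char) (i : Int) =>
        (st.1 ++ [[(PySem.List.pyGet? w i).getD ' '] ++ [' '] ++ st.2 ++ [' '] ++
            [(PySem.List.pyGet? w i).getD ' ']],
         [(PySem.List.pyGet? w i).getD ' '] ++ [' '] ++ st.2 ++ [' '] ++
            [(PySem.List.pyGet? w i).getD ' '])) ([[w.headD ' ']], [w.headD ' ']) =
    ((List.range (k + 1)).map (pyr w), pyr w k) := by
  induction k with
  | zero =>
    rw [show ((0 : Nat) : Int) + 1 = 1 by norm_num, PySem.List.pyRange_one_eq_nil (by norm_num)]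
    simp [pyr]
  | succ k ih =>
    have hk' : k < w.length := Nat.lt_of_succ_lt hk
    rw [show ((k + 1 : Nat) : Int) + 1 = ((k : Int) + 1) + 1 by push_cast; ring,
        PySem.List.pyRange_one_succ_right (by omega), List.foldl_append, ih hk']
    have hget : PySem.List.pyGet? w ((k : Int) + 1) = some (w.getD (k + 1) ' ') := by
      rw [show ((k : Int) + 1) = ((k + 1 : Nat) : Int) by push_cast; ring,
          PySem.List.pyGet?_natCast]
      simp [List.getD_eq_getElem?_getD, List.getElem?_eq_getElem hk]
    simp [hget, pyr, List.range_succ]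

-- " ".join over singleton pieces: peel the head
theorem join_sing_cons (sep : List Char) (c : Char) (cs : List Char) (h : cs ≠ []) :
    PySem.Chars.join sep ((c :: cs).map (fun c => [c])) =
    [c] ++ sep ++ PySem.Chars.join sep (cs.map (fun c => [c])) := by
  cases cs with
  | nil => exact absurd rfl h
  | cons d ds => simp [PySem.Chars.join_cons_cons]

-- " ".join over singleton pieces: peel the last element
theorem join_sing_append (sep : List Char) (cs : List Char) (c : Char) (h : cs ≠ []) :
    PySem.Chars.join sep ((cs ++ [c]).map (fun c => [c])) =
    PySem.Chars.join sep (cs.map (fun c => [c])) ++ sep ++ [c] := by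
  induction cs with
  | nil => exact absurd rfl h
  | cons a as ih =>
    cases as with
    | nil => simp [PySem.Chars.join_cons_cons, PySem.Chars.join_singleton]
    | cons b bs =>
      rw [List.cons_append, join_sing_cons sep a ((b :: bs) ++ [c]) (by simp),
          ih (by simp), join_sing_cons sep a (b :: bs) (by simp)]
      simp

-- "".join is concatenation
theorem join_nil_flatten (ps : List (List Char)) :
    PySem.Chars.join [] ps = ps.flatten := by
  induction ps with
  | nil => simp [PySem.Chars.join_nil]
  | cons p ps ih =>
    cases ps with
    | nil => simp [PySem.Chars.join_singleton]
    | cons q qs => rw [PySem.Chars.join_cons_cons, ih]; simp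

-- B's line j equals A's accumulated line j
theorem B_line (w : List Char) (hw : w ≠ []) (j : Nat) (hj : j < w.length) :
    PySem.Chars.join [' ']
      (((w.take (j + 1)).reverse ++ w.tail.take j).map (fun c => [c])) = pyr w j := by
  induction j with
  | zero =>
    cases w with
    | nil => exact absurd rfl hw
    | cons c t => simp [PySem.Chars.join_singleton, pyr]
  | succ j ih =>
    have hj' : j < w.length := Nat.lt_of_succ_lt hj
    have htake : w.take (j + 2) = w.take (j + 1) ++ [w.getD (j + 1) ' '] := by
      rw [List.take_add_one]
      simp [List.getD_eq_getElem?_getD, List.getElem?_eq_getElem hj]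
    have htail : w.tail.take (j + 1) = w.tail.take j ++ [w.getD (j + 1) ' '] := by
      have hjt : j < w.tail.length := by simp [List.length_tail]; omega
      rw [List.take_add_one]
      simp [List.getElem?_eq_getElem hjt, List.getD_eq_getElem?_getD, List.getElem_tail,
            List.getElem?_eq_getElem hj]
    have hrev : (w.take (j + 2)).reverse = w.getD (j + 1) ' ' :: (w.take (j + 1)).reverse := by
      rw [htake]; simp
    have hmidne : (w.take (j + 1)).reverse ++ w.tail.take j ≠ [] := by
      intro hc
      rcases List.append_eq_nil_iff.mp hc with ⟨h1, _⟩
      rw [List.reverse_eq_nil_iff, List.take_eq_nil_iff] at h1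
      rcases h1 with h1 | h1
      · omega
      · exact hw h1
    rw [hrev, htail, show w.getD (j+1) ' ' :: (w.take (j+1)).reverse ++ (w.tail.take j ++ [w.getD (j+1) ' ']) =
          w.getD (j+1) ' ' :: (((w.take (j+1)).reverse ++ w.tail.take j) ++ [w.getD (j+1) ' ']) by simp,
        join_sing_cons _ _ _ (by simp),
        join_sing_append _ _ _ hmidne, ih hj']
    simp [pyr]

-- ===== VERDICT (by name: the statement is the Claim_ definition above) =====
theorem repeat_pyramid_spec : Claim_equal_repeat_pyramid := by
  intro word _ hpre
  unfold Spec_repeat_pyramid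
  have hw : word.toList ≠ [] := by
    intro h
    exact hpre (by rwa [← String.toList_eq_nil_iff])
  simp only [repeat_pyramid, repeat_pyramid_alt]
  generalize hgen : word.toList = w
  rw [hgen] at hw
  have hn1 : 1 ≤ w.length := List.length_pos_iff.mpr hw
  have hget0 : PySem.List.pyGet? w 0 = some (w.headD ' ') := by
    cases hcase : w with
    | nil => exact absurd hcase hw
    | cons c t => simp [PySem.List.pyGet?, PySem.List.pyIdx?]
  simp only [hget0]
  -- A's first loop computes the unpadded lines
  rw [show PySem.List.pyRange 1 (w.length : Int) =
        PySem.List.pyRange 1 (((w.length - 1 : Nat) : Int) + 1) by congr 1; omega,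
      A_loop w (w.length - 1) (by omega), Nat.sub_add_cancel hn1]
  -- B's foldl builds the list of padded lines
  rw [PySem.List.foldl_append_singleton_eq_map]
  simp only [List.nil_append]
  -- both final loops concatenate line ++ "\n"
  rw [join_nil_flatten, List.map_map, List.map_map,
      show (fun (acc z : List Char) => acc ++ z ++ ['\n']) =
           (fun (acc z : List Char) => acc ++ (z ++ ['\n'])) by funext acc z; simp,
      PySem.List.foldl_append_eq_flatMap, List.nil_append, List.flatMap_def]
  congr 1
  congr 1
  rw [List.map_map]
  apply List.map_congr_left
  intro j hj
  rw [List.mem_range] at hj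
  -- B's line j
  have h1 : PySem.List.slice w none (some ((j : Int) + 1)) = w.take (j + 1) := by
    rw [show ((j : Int) + 1) = ((j + 1 : Nat) : Int) by push_cast; ring,
        PySem.List.slice_to_natCast]
  have h2 : PySem.List.slice w (some 1) (some ((j : Int) + 1)) = w.tail.take j := by
    rw [show (some (1 : Int)) = some (((1 : Nat) : Int)) by norm_num,
        show ((j : Int) + 1) = ((j + 1 : Nat) : Int) by push_cast; ring,
        PySem.List.slice_natCast]
    simp [List.drop_one]
  simp only [Function.comp, h1, h2, PySem.List.slice?_none_none_neg_one, Option.getD_some,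
             B_line w hw j hj, pyr_length]
  -- A's padding count equals B's closed form
  congr 3
  push_cast
  omega
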